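-- pv_equiv track=rewrite | github.com/chemaavila/EVENTSEC | backend/app/routers/inventory_vulns_router.py | _risk_labels_from_min
-- ===== SOURCE A (Python) =====
-- from typing import List, Optional
--
-- def _risk_labels_from_min(min_risk: Optional[str]) -> Optional[List[str]]:
--     if not min_risk:
--         return None
--     order = ["LOW", "MEDIUM", "HIGH", "CRITICAL"]
--     min_risk = min_risk.upper()
--     if min_risk not in order:
--         return None
--     return [label for label in order if order.index(label) >= order.index(min_risk)]
-- ===== SOURCE B (Python) =====
-- from typing import List, Optional
--
-- def _risk_labels_from_min(min_risk: Optional[str]) -> Optional[List[str]]: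
--     # Simpler: locate the minimum once and return the suffix slice, no per-element filtering.
--     if not min_risk:
--         return None
--     order = ["LOW", "MEDIUM", "HIGH", "CRITICAL"]
--     try:
--         i = order.index(min_risk.upper())
--     except ValueError:
--         return None
--     return order[i:]
-- ===== Notes on version B (the rewrite author's own statement) =====
-- stated objective: simpler
-- what changed: Replaces the filtering comprehension with repeated order.index lookups by a single order.index call and a suffix slice order[i:].
import Mathlib
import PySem

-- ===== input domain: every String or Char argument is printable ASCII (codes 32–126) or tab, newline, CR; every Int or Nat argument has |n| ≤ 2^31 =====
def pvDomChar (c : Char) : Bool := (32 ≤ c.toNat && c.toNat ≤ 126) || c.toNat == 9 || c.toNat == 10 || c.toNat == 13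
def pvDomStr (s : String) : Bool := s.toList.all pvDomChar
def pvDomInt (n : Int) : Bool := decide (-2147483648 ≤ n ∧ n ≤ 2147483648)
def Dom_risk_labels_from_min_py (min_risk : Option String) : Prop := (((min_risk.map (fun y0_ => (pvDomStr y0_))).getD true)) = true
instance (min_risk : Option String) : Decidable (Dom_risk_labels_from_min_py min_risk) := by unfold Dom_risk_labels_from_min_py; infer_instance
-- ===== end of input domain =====

-- B replaces the per-element filtering comprehension by one index lookup and a suffix slice (objective: simpler).


-- ===== PORT A =====
-- order.index(x) is exact as (index? …).getD 0: both arguments are guaranteed members here.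
def risk_labels_from_min_py (min_risk : Option String) : Option (List String) :=
  match min_risk with
  | none => none
  | some s =>
    if s = "" then none
    else
      let order : List String := ["LOW", "MEDIUM", "HIGH", "CRITICAL"]
      let m := PySem.Str.upper s
      if ¬ (m ∈ order) then none
      else some (order.filter (fun label =>
        ((PySem.List.index? order label).getD 0 : Nat) ≥ (PySem.List.index? order m).getD 0))

-- ===== PORT B =====
def risk_labels_from_min_py_alt (min_risk : Option String) : Option (List String) :=
  match min_risk with
  | none => none
  | some s =>
    if s = "" then none
    else
      let order : List String := ["LOW", "MEDIUM", "HIGH", "CRITICAL"]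
      match PySem.List.index? order (PySem.Str.upper s) with
      | none => none
      | some i => some (PySem.List.slice order (some (i : Int)) none)

-- ===== PRECONDITION & SPEC =====
def Spec_risk_labels_from_min_py (min_risk : Option String) (out : Option (List String)) : Prop := out = risk_labels_from_min_py_alt min_risk
instance (min_risk : Option String) (out : Option (List String)) : Decidable (Spec_risk_labels_from_min_py min_risk out) := by unfold Spec_risk_labels_from_min_py; infer_instance

-- ===== CLAIM (what is proved, stated in full; the proofs are below) =====
def Claim_equal_risk_labels_from_min_py : Prop := ∀ (min_risk : Option String), Dom_risk_labels_from_min_py min_risk → Spec_risk_labels_from_min_py min_risk (risk_labels_from_min_py min_risk)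

-- ===== LEMMAS AND PROOFS =====
-- both tails agree as functions of the uppercased string
lemma pv_tail_eq (m : String) :
    (if ¬ (m ∈ (["LOW", "MEDIUM", "HIGH", "CRITICAL"] : List String)) then (none : Option (List String))
     else some ((["LOW", "MEDIUM", "HIGH", "CRITICAL"] : List String).filter (fun label =>
        ((PySem.List.index? ["LOW", "MEDIUM", "HIGH", "CRITICAL"] label).getD 0 : Nat) ≥ (PySem.List.index? ["LOW", "MEDIUM", "HIGH", "CRITICAL"] m).getD 0)))
    =
    (match PySem.List.index? (["LOW", "MEDIUM", "HIGH", "CRITICAL"] : List String) m with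
     | none => none
     | some i => some (PySem.List.slice ["LOW", "MEDIUM", "HIGH", "CRITICAL"] (some (i : Int)) none)) := by
  by_cases h : m ∈ (["LOW", "MEDIUM", "HIGH", "CRITICAL"] : List String)
  · fin_cases h <;> decide
  · simp [h, List.idxOf?_eq_none_iff.mpr h]

-- ===== VERDICT (by name: the statement is the Claim_ definition above) =====
theorem risk_labels_from_min_py_spec : Claim_equal_risk_labels_from_min_py := by
  intro min_risk _
  unfold Spec_risk_labels_from_min_py risk_labels_from_min_py risk_labels_from_min_py_alt
  match min_risk with
  | none => rfl
  | some s =>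
    by_cases hs : s = ""
    · simp [hs]
    · simp only [hs, if_false]
      exact pv_tail_eq (PySem.Str.upper s)
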